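-- pv_equiv track=rewrite | github.com/MDivyaPrakash/Network_Security_Code | Lab1_Qn3.py | decrypt_function
-- ===== SOURCE A (Python) =====
-- def fibonacci_function(n):
--    if n == 0:
--        return 0
--    elif n == 1:
--        return 1
--    else:
--        n1 = 0
--        n2 = 1
--        i = 2
--        while ( i <= n ):
--            n3 = n1 + n2
--            n1 = n2
--            n2 = n3
--            i = i +1
--        return n3
--
-- def decrypt_function(inp_txt, inp_key):
--     lnth = len(inp_txt)
--     i = 0
--     j = 0
--     dec_txt = ''
--     inp_txt = inp_txt.upper()
--     while (i < lnth):
--         if inp_txt[i] != ' ':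
--             shift_key = fibonacci_function(inp_key + j) % 26
--             org_posn = ord(inp_txt[i])
--             if org_posn - shift_key < 65:
--                 dec_txt = dec_txt + chr(org_posn + 26 - shift_key)
--             else:
--                 dec_txt = dec_txt + chr(org_posn - shift_key)
--             i = i + 1
--             j = j + 1
--         else:
--             dec_txt = dec_txt + ' '
--             j = 0
--             i = i + 1
--             inp_key = shift_key
--     return dec_txt
-- ===== SOURCE B (Python) =====
-- def decrypt_function(inp_txt, inp_key):
--     # One pass; Fibonacci shift maintained incrementally mod 26 instead of
--     # recomputing the full Fibonacci number for every character.
--     def fib_pair_mod26(n):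
--         a, b = 0, 1
--         for _ in range(n):
--             a, b = b, (a + b) % 26
--         return a, b
--     a, b = fib_pair_mod26(inp_key)
--     last = 0
--     out = []
--     for ch in inp_txt.upper():
--         if ch == ' ':
--             out.append(' ')
--             a, b = fib_pair_mod26(last)
--         else:
--             shift = a
--             o = ord(ch)
--             if o - shift < 65:
--                 out.append(chr(o + 26 - shift))
--             else:
--                 out.append(chr(o - shift))
--             a, b = b, (a + b) % 26
--             last = shift
--     return ''.join(out)
-- ===== Notes on version B (the rewrite author's own statement) =====
-- stated objective: faster
-- what changed: B makes one pass maintaining the Fibonacci pair incrementally modulo 26 (resetting it from the last shift at each space), instead of A's recomputation of the full exact Fibonacci number fib(key+j) for every character.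
import Mathlib
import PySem

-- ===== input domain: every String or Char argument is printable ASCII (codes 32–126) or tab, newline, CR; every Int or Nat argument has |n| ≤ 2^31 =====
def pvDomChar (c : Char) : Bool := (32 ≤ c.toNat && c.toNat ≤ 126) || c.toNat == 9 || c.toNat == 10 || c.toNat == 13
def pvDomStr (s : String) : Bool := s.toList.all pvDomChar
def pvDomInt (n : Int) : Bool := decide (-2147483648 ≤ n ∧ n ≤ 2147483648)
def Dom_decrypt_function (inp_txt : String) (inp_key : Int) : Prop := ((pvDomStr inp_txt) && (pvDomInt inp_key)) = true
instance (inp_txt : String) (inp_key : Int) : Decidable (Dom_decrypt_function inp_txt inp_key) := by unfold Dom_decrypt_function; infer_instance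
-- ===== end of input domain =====

-- B replaces A's per-character full Fibonacci recomputation by an incrementally
-- maintained Fibonacci pair mod 26 (objective: faster, asymptotically).

-- ===== PORT A =====
-- while-loop of fibonacci_function: k remaining iterations, state (n1, n2); returns final n2 (= n3)
def fibLoop : Nat → Int → Int → Int
  | 0, _, n2 => n2
  | k + 1, n1, n2 => fibLoop k n2 (n1 + n2)

def fibonacci_function (n : Int) : Int :=
  if n = 0 then 0
  else if n = 1 then 1
  else fibLoop (n - 1).toNat 0 1   -- i = 2 .. n : (n-1) iterations; n < 2 here raises in Python (excluded by Pre_)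

-- A's while-loop over the upper-cased characters; state (j, inp_key, shift_key, dec_txt).
-- shift_key starts unbound in Python; Pre_ guarantees it is written before it is read, seed 0 here.
def decLoopA : List Char → Int → Int → Int → List Char → List Char
  | [], _, _, _, acc => acc
  | c :: cs, j, key, sk, acc =>
    if c ≠ ' ' then
      let shift := PySem.Int.mod (fibonacci_function (key + j)) 26
      let o : Int := (c.toNat : Int)
      let acc' := if o - shift < 65
        then acc ++ [Char.ofNat (o + 26 - shift).toNat]
        else acc ++ [Char.ofNat (o - shift).toNat]
      decLoopA cs (j + 1) key shift acc'
    else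
      decLoopA cs 0 sk sk (acc ++ [' '])

def decrypt_function (inp_txt : String) (inp_key : Int) : String :=
  String.mk (decLoopA (PySem.Str.upper inp_txt).toList 0 inp_key 0 [])

-- ===== PORT B =====
-- fib_pair_mod26: k iterations of (a, b) -> (b, (a+b) % 26) from (0, 1)
def fibPairLoop : Nat → Int → Int → Int × Int
  | 0, a, b => (a, b)
  | k + 1, a, b => fibPairLoop k b (PySem.Int.mod (a + b) 26)

def fibPairMod26 (n : Int) : Int × Int := fibPairLoop n.toNat 0 1

def decLoopB : List Char → Int → Int → Int → List Char → List Char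
  | [], _, _, _, out => out
  | c :: cs, a, b, last, out =>
    if c = ' ' then
      let p := fibPairMod26 last
      decLoopB cs p.1 p.2 last (out ++ [' '])
    else
      let shift := a
      let o : Int := (c.toNat : Int)
      let out' := if o - shift < 65
        then out ++ [Char.ofNat (o + 26 - shift).toNat]
        else out ++ [Char.ofNat (o - shift).toNat]
      decLoopB cs b (PySem.Int.mod (a + b) 26) shift out'

def decrypt_function_alt (inp_txt : String) (inp_key : Int) : String :=
  let p := fibPairMod26 inp_key
  String.mk (decLoopB (PySem.Str.upper inp_txt).toList p.1 p.2 0 [])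

-- ===== PRECONDITION & SPEC =====
-- Pre_ excludes exactly the inputs where A raises: a leading space (shift_key is read
-- before it is ever bound → UnboundLocalError), and a negative key together with at
-- least one character (fibonacci_function's n3 is unbound for n < 0 → UnboundLocalError).
def Pre_decrypt_function (inp_txt : String) (inp_key : Int) : Prop :=
  inp_txt.toList.head? ≠ some ' ' ∧ (inp_txt.toList = [] ∨ 0 ≤ inp_key)
instance (inp_txt : String) (inp_key : Int) : Decidable (Pre_decrypt_function inp_txt inp_key) := by
  unfold Pre_decrypt_function; infer_instance

def pvWitness_decrypt_function : String × Int := ("KHOOR ZRUOG", 3)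

def Spec_decrypt_function (inp_txt : String) (inp_key : Int) (out : String) : Prop := out = decrypt_function_alt inp_txt inp_key
instance (inp_txt : String) (inp_key : Int) (out : String) : Decidable (Spec_decrypt_function inp_txt inp_key out) := by unfold Spec_decrypt_function; infer_instance

-- ===== CLAIM (what is proved, stated in full; the proofs are below) =====
def Claim_equal_decrypt_function : Prop := ∀ (inp_txt : String) (inp_key : Int), Dom_decrypt_function inp_txt inp_key → Pre_decrypt_function inp_txt inp_key → Spec_decrypt_function inp_txt inp_key (decrypt_function inp_txt inp_key)

-- ===== LEMMAS AND PROOFS =====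

-- exact Fibonacci pair iteration (proof ghost): k steps of (a, b) -> (b, a+b)
def fibPairE : Nat → Int → Int → Int × Int
  | 0, a, b => (a, b)
  | k + 1, a, b => fibPairE k b (a + b)

theorem fibLoop_eq_fibPairE (k : Nat) : ∀ a b : Int, fibLoop k a b = (fibPairE k a b).2 := by
  induction k with
  | zero => intro a b; rfl
  | succ k ih => intro a b; simp [fibLoop, fibPairE, ih]

theorem fibPairE_succ (k : Nat) : ∀ a b : Int,
    fibPairE (k + 1) a b = ((fibPairE k a b).2, (fibPairE k a b).1 + (fibPairE k a b).2) := by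
  induction k with
  | zero => intro a b; rfl
  | succ k ih =>
    intro a b
    show fibPairE (k + 1) b (a + b) = _
    rw [ih]
    rfl

theorem fibPairLoop_succ (k : Nat) : ∀ a b : Int,
    fibPairLoop (k + 1) a b
      = ((fibPairLoop k a b).2, PySem.Int.mod ((fibPairLoop k a b).1 + (fibPairLoop k a b).2) 26) := by
  induction k with
  | zero => intro a b; rfl
  | succ k ih =>
    intro a b
    show fibPairLoop (k + 1) b (PySem.Int.mod (a + b) 26) = _
    rw [ih]
    rfl

theorem fibPairLoop_mod (k : Nat) : ∀ a b : Int,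
    fibPairLoop k (PySem.Int.mod a 26) (PySem.Int.mod b 26)
      = (PySem.Int.mod (fibPairE k a b).1 26, PySem.Int.mod (fibPairE k a b).2 26) := by
  induction k with
  | zero => intro a b; rfl
  | succ k ih =>
    intro a b
    show fibPairLoop k (PySem.Int.mod b 26)
        (PySem.Int.mod (PySem.Int.mod a 26 + PySem.Int.mod b 26) 26) = _
    have hm : PySem.Int.mod (PySem.Int.mod a 26 + PySem.Int.mod b 26) 26
        = PySem.Int.mod (a + b) 26 := by
      simp only [PySem.Int.mod_eq_emod_of_pos (by norm_num : (0:Int) < 26)]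
      omega
    rw [hm, ih]
    rfl

theorem fibPairMod26_fst (n : Int) (hn : 0 ≤ n) :
    (fibPairMod26 n).1 = PySem.Int.mod (fibonacci_function n) 26 := by
  unfold fibPairMod26 fibonacci_function
  have h0 : (0 : Int) = PySem.Int.mod 0 26 := by decide
  have h1 : (1 : Int) = PySem.Int.mod 1 26 := by decide
  by_cases hz : n = 0
  · subst hz; decide
  by_cases ho : n = 1
  · subst ho; decide
  · simp only [hz, ho, if_false]
    obtain ⟨m, rfl⟩ : ∃ m : Nat, n = (m : Int) := ⟨n.toNat, (Int.toNat_of_nonneg hn).symm⟩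
    have hm2 : 2 ≤ m := by omega
    obtain ⟨m', rfl⟩ : ∃ m', m = m' + 1 := ⟨m - 1, by omega⟩
    have ht : ((m' + 1 : Nat) : Int).toNat = m' + 1 := by omega
    have ht' : (((m' + 1 : Nat) : Int) - 1).toNat = m' := by omega
    rw [ht, ht', fibLoop_eq_fibPairE]
    conv_lhs => rw [h0, h1]
    rw [fibPairLoop_mod, fibPairE_succ]

theorem decLoop_eq (cs : List Char) : ∀ (j key sk : Int) (acc : List Char),
    0 ≤ j → 0 ≤ key → 0 ≤ sk →
    decLoopA cs j key sk acc
      = decLoopB cs (fibPairMod26 (key + j)).1 (fibPairMod26 (key + j)).2 sk acc := by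
  induction cs with
  | nil => intro j key sk acc _ _ _; rfl
  | cons c cs ih =>
    intro j key sk acc hj hk hs
    by_cases hc : c = ' '
    · subst hc
      simp only [decLoopA, decLoopB, if_true, ne_eq, not_true_eq_false, if_false]
      have := ih 0 sk sk (acc ++ [' ']) le_rfl hs hs
      simpa using this
    · have hshift : (fibPairMod26 (key + j)).1
          = PySem.Int.mod (fibonacci_function (key + j)) 26 :=
        fibPairMod26_fst _ (by omega)
      have hsnn : 0 ≤ (fibPairMod26 (key + j)).1 := by
        rw [hshift]; exact PySem.Int.mod_nonneg _ (by norm_num)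
      have hstep : fibPairMod26 (key + (j + 1))
          = ((fibPairMod26 (key + j)).2,
             PySem.Int.mod ((fibPairMod26 (key + j)).1 + (fibPairMod26 (key + j)).2) 26) := by
        unfold fibPairMod26
        have : (key + (j + 1)).toNat = (key + j).toNat + 1 := by omega
        rw [this, fibPairLoop_succ]
      have hstep1 : (fibPairMod26 (key + (j + 1))).1 = (fibPairMod26 (key + j)).2 := by rw [hstep]
      have hstep2 : (fibPairMod26 (key + (j + 1))).2
          = PySem.Int.mod ((fibPairMod26 (key + j)).1 + (fibPairMod26 (key + j)).2) 26 := by rw [hstep]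
      simp only [decLoopA, decLoopB, ne_eq, hc, not_false_eq_true, if_true, if_false]
      rw [← hshift]
      rw [ih (j + 1) key (fibPairMod26 (key + j)).1 _ (by omega) hk hsnn]
      rw [hstep1, hstep2]

-- ===== VERDICT (by name: the statement is the Claim_ definition above) =====
theorem decrypt_function_spec : Claim_equal_decrypt_function := by
  intro inp_txt inp_key _ hpre
  unfold Spec_decrypt_function decrypt_function decrypt_function_alt
  obtain ⟨hhead, hrest⟩ := hpre
  rcases hrest with hnil | hk
  · have : (PySem.Str.upper inp_txt).toList = [] := by
      simp [PySem.Str.toList_upper, hnil, PySem.Chars.upper]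
    simp [this, decLoopA, decLoopB]
  · have := decLoop_eq (PySem.Str.upper inp_txt).toList 0 inp_key 0 [] le_rfl hk le_rfl
    exact congrArg String.mk (by simpa using this)
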